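-- pv_equiv track=rewrite | github.com/shumanhi/nullion | src/nullion/live_information.py | _word_tokens
-- ===== SOURCE A (Python) =====
-- def _word_tokens(message: str) -> tuple[str, ...]:
--     tokens: list[str] = []
--     current: list[str] = []
--     for char in message:
--         if char.isalnum():
--             current.append(char)
--             continue
--         if current:
--             tokens.append("".join(current))
--             current = []
--     if current:
--         tokens.append("".join(current))
--     return tuple(tokens)
-- ===== SOURCE B (Python) =====
-- def _word_tokens(message: str) -> tuple[str, ...]:
--     tokens = []
--     i = 0
--     n = len(message)
--     while i < n:
--         if not message[i].isalnum():
--             i += 1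
--             continue
--         j = i + 1
--         while j < n and message[j].isalnum():
--             j += 1
--         tokens.append(message[i:j])
--         i = j
--     return tuple(tokens)
-- ===== Notes on version B (the rewrite author's own statement) =====
-- stated objective: alternative
-- what changed: Replaced the per-character state machine (pending 'current' buffer with two flush points) by a run-scanning two-pointer loop that finds each maximal alphanumeric run and slices it out directly, keeping no pending buffer.
import Mathlib
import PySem

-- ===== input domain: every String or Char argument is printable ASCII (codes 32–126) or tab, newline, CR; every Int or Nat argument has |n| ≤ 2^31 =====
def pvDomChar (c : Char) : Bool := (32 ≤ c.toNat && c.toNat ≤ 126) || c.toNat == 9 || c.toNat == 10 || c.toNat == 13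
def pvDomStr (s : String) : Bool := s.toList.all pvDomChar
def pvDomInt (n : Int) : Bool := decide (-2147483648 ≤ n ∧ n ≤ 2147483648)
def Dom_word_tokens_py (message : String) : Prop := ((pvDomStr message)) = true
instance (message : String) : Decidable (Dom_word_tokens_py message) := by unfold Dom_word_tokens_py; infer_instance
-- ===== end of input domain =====

-- B rewrites A's per-character state machine (pending buffer, two flush points) as a
-- run-scanning loop that slices out each maximal alphanumeric run; alternative, same cost.

-- ===== PORT A =====
-- one step of A's for-loop over the characters: state = (tokens, current)
def wtStepA (st : List String × List Char) (c : Char) : List String × List Char :=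
  if PySem.Chars.isalnum c then (st.1, st.2 ++ [c])
  else if st.2 ≠ [] then (st.1 ++ [String.ofList st.2], []) else (st.1, [])

-- the final 'if current: tokens.append(...)'
def wtFinishA (st : List String × List Char) : List String :=
  if st.2 ≠ [] then st.1 ++ [String.ofList st.2] else st.1

def word_tokens_py (message : String) : List String :=
  wtFinishA (message.toList.foldl wtStepA ([], []))

-- ===== PORT B =====
-- Source B's while-loop: skip a non-alnum char, or take the maximal alnum run and resume after it
def wtGoB (cs : List Char) : List String :=
  match cs with
  | [] => []
  | c :: rest =>
    if PySem.Chars.isalnum c then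
      String.ofList (List.takeWhile PySem.Chars.isalnum (c :: rest))
        :: wtGoB (List.dropWhile PySem.Chars.isalnum rest)
    else wtGoB rest
termination_by cs.length
decreasing_by
  · simpa using Nat.lt_succ_of_le (List.length_dropWhile_le _ _)
  · simp

def word_tokens_py_alt (message : String) : List String := wtGoB message.toList

-- ===== PRECONDITION & SPEC =====
def Spec_word_tokens_py (message : String) (out : List String) : Prop := out = word_tokens_py_alt message
instance (message : String) (out : List String) : Decidable (Spec_word_tokens_py message out) := by unfold Spec_word_tokens_py; infer_instance

-- ===== CLAIM (what is proved, stated in full; the proofs are below) =====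
def Claim_equal_word_tokens_py : Prop := ∀ (message : String), Dom_word_tokens_py message → Spec_word_tokens_py message (word_tokens_py message)

-- ===== LEMMAS AND PROOFS =====

-- B on an all-alnum list is one token (or none)
lemma wtGoB_all (cur : List Char) (h : ∀ c ∈ cur, PySem.Chars.isalnum c = true) :
    wtGoB cur = if cur ≠ [] then [String.ofList cur] else [] := by
  cases cur with
  | nil => simp [wtGoB]
  | cons d t =>
    have hd := h d (by simp)
    rw [wtGoB]
    simp only [if_pos, List.takeWhile_cons, hd]
    have ht : List.takeWhile PySem.Chars.isalnum t = t :=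
      List.takeWhile_eq_self_iff.mpr (fun c hc => h c (by simp [hc]))
    have hdrop : List.dropWhile PySem.Chars.isalnum t = [] :=
      List.dropWhile_eq_nil_iff.mpr (fun c hc => h c (by simp [hc]))
    simp [ht, hdrop, wtGoB]

-- B on (all-alnum run ++ non-alnum char :: rest)
lemma wtGoB_run (cur : List Char) (c : Char) (cs : List Char)
    (hcur : ∀ x ∈ cur, PySem.Chars.isalnum x = true)
    (hc : PySem.Chars.isalnum c = false) (hne : cur ≠ []) :
    wtGoB (cur ++ c :: cs) = String.ofList cur :: wtGoB cs := by
  cases cur with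
  | nil => exact absurd rfl hne
  | cons d t =>
    have hd := hcur d (by simp)
    rw [List.cons_append, wtGoB]
    have htake : List.takeWhile PySem.Chars.isalnum (d :: (t ++ c :: cs)) = d :: t := by
      rw [List.takeWhile_cons_of_pos hd]
      rw [List.takeWhile_append_of_pos (fun x hx => hcur x (by simp [hx]))]
      simp [List.takeWhile_cons_of_neg, hc]
    have hdrop : List.dropWhile PySem.Chars.isalnum (t ++ c :: cs) = c :: cs := by
      rw [List.dropWhile_append_of_pos (fun x hx => hcur x (by simp [hx]))]
      simp [List.dropWhile_cons_of_neg, hc]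
    simp only [hd, if_pos, hdrop]
    rw [htake]
    rw [wtGoB]
    simp [hc]

-- main invariant: A's loop from state (acc, cur) with cur all-alnum yields acc ++ wtGoB (cur ++ cs)
lemma wtMain (cs : List Char) : ∀ (acc : List String) (cur : List Char),
    (∀ c ∈ cur, PySem.Chars.isalnum c = true) →
    wtFinishA (cs.foldl wtStepA (acc, cur)) = acc ++ wtGoB (cur ++ cs) := by
  induction cs with
  | nil =>
    intro acc cur h
    simp only [List.foldl_nil, List.append_nil]
    rw [wtGoB_all cur h, wtFinishA]
    split_ifs <;> simp_all
  | cons c cs ih =>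
    intro acc cur h
    simp only [List.foldl_cons]
    by_cases hc : PySem.Chars.isalnum c = true
    · rw [show wtStepA (acc, cur) c = (acc, cur ++ [c]) by simp [wtStepA, hc]]
      rw [ih acc (cur ++ [c]) (by intro x hx; rcases List.mem_append.mp hx with h1 | h1
                                  · exact h x h1
                                  · simp_all)]
      simp
    · have hc' : PySem.Chars.isalnum c = false := by simpa using hc
      by_cases hcur : cur = []
      · subst hcur
        rw [show wtStepA (acc, []) c = (acc, []) by simp [wtStepA, hc']]
        rw [ih acc [] (by simp)]
        simp only [List.nil_append]
        rw [wtGoB]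
        simp [hc']
      · rw [show wtStepA (acc, cur) c = (acc ++ [String.ofList cur], []) by
              simp [wtStepA, hc', hcur]]
        rw [ih (acc ++ [String.ofList cur]) [] (by simp)]
        rw [wtGoB_run cur c cs h hc' hcur]
        simp

-- ===== VERDICT (by name: the statement is the Claim_ definition above) =====
theorem word_tokens_py_spec : Claim_equal_word_tokens_py := by
  intro message _
  unfold Spec_word_tokens_py word_tokens_py word_tokens_py_alt
  simpa using wtMain message.toList [] [] (by simp)
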